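-- pv_equiv track=rewrite | github.com/graevsky/ITMO | 2COURSE/2SEM/Csa/lab3/source/translator.py | expand_procedures
-- ===== SOURCE A (Python) =====
-- def expand_procedures(commands, procedures):
--     expanded_program = []
--     for command in commands:
--         if command in procedures:
--             expanded_program.extend(expand_procedures(procedures[command], procedures))
--         else:
--             expanded_program.append(command)
--     return expanded_program
-- ===== SOURCE B (Python) =====
-- _SENTINEL = object()
--
--
-- def expand_procedures(commands, procedures):
--     # Iterative preorder expansion: explicit stack of iterators instead of recursion.
--     result = []
--     stack = [iter(commands)]
--     while stack:
--         command = next(stack[-1], _SENTINEL)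
--         if command is _SENTINEL:
--             stack.pop()
--         elif command in procedures:
--             stack.append(iter(procedures[command]))
--         else:
--             result.append(command)
--     return result
-- ===== Notes on version B (the rewrite author's own statement) =====
-- stated objective: alternative
-- what changed: Recursive call-per-procedure expansion replaced by a single iterative loop over an explicit stack of iterators that produces the same preorder expansion; Pre_ excludes exactly the inputs on which A raises RecursionError (a cyclic procedure definition reachable from commands; B loops forever there too), while tables whose cycles are unreachable from commands stay inside the claim.
import Mathlib
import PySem

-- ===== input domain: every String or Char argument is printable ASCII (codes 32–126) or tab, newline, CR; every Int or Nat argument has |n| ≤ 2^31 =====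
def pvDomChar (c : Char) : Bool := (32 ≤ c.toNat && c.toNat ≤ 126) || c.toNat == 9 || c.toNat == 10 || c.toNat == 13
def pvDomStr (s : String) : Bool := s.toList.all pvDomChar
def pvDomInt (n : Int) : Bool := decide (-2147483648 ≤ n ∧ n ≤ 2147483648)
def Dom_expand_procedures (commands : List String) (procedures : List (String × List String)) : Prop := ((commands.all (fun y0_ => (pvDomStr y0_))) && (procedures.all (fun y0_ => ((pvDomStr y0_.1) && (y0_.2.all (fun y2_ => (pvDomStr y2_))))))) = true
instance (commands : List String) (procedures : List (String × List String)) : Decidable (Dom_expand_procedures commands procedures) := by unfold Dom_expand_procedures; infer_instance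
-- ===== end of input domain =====

-- B replaces A's recursion by one iterative loop over an explicit stack of iterators (same preorder output).
-- Return-value equivalence on every input where A returns; where a cycle is reachable Python A raises RecursionError.

-- ===== PORT A =====
-- A's recursion does not terminate when a cyclic procedure definition is reachable (Python raises
-- RecursionError there), so the port carries a depth guard `d` (none = guard exhausted); the top call uses
-- d = procedures.length + 1, which Pre_ proves sufficient, so the guard never fires on admitted inputs.
def expandA (procedures : List (String × List String)) : Nat → List String → Option (List String)
  | _, [] => some []
  | d, c :: cs =>
    match procedures.lookup c with                      -- `command in procedures` / `procedures[command]` (first match)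
    | some body =>
      match d with
      | 0 => none
      | d' + 1 =>
        match expandA procedures d' body, expandA procedures (d' + 1) cs with
        | some eb, some ec => some (eb ++ ec)           -- expanded_program.extend(...)
        | _, _ => none
    | none => (expandA procedures d cs).map (fun ec => c :: ec)   -- expanded_program.append(command)
  termination_by d cmds => (d, cmds.length)

def expand_procedures (commands : List String) (procedures : List (String × List String)) : List String :=
  (expandA procedures (procedures.length + 1) commands).getD []

-- ===== PORT B =====
-- fuel for B's while-loop (termination guard only): the exact number of loop iterations B performs
def stepsB (procedures : List (String × List String)) : Nat → List String → Nat
  | _, [] => 1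
  | d, c :: cs =>
    match procedures.lookup c with
    | some body =>
      (match d with
       | 0 => 1
       | d' + 1 => 1 + stepsB procedures d' body) + stepsB procedures d cs
    | none => 1 + stepsB procedures d cs
  termination_by d cmds => (d, cmds.length)

-- the while-loop: stack of "iterators" (remaining element lists), head = top of stack
def loopB (procedures : List (String × List String)) : Nat → List (List String) → List String → Option (List String)
  | _, [], result => some result                                    -- while stack: exhausted
  | 0, _ :: _, _ => none                                            -- fuel guard (never fires under Pre_)
  | fuel + 1, [] :: rest, result => loopB procedures fuel rest result          -- StopIteration: stack.pop()
  | fuel + 1, (c :: cs) :: rest, result =>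
    match procedures.lookup c with
    | some body => loopB procedures fuel (body :: cs :: rest) result           -- push iter(procedures[command])
    | none => loopB procedures fuel (cs :: rest) (result ++ [c])               -- result.append(command)

def expand_procedures_alt (commands : List String) (procedures : List (String × List String)) : List String :=
  (loopB procedures (stepsB procedures (procedures.length + 1) commands) [commands] []).getD []

-- ===== PRECONDITION & SPEC =====
-- call-nesting depth of a command, computed to at most n rounds of body lookups
def lvl (procedures : List (String × List String)) : Nat → String → Nat
  | 0, _ => 0
  | n + 1, c =>
    match procedures.lookup c with
    | some body => (body.map (lvl procedures n)).foldl max 0 + 1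
    | none => 0

-- Pre_ excludes exactly the inputs on which Python A raises (RecursionError): commands from which a
-- cyclic procedure definition is reachable — there the nesting depth lvl keeps growing with the round
-- bound, so it has not stabilized after procedures.length rounds. Cycles unreachable from commands are
-- admitted. lvl reads only the input call graph; it computes no expansion.
def Pre_expand_procedures (commands : List String) (procedures : List (String × List String)) : Prop :=
  ∀ c ∈ commands, lvl procedures procedures.length c = lvl procedures (procedures.length + 1) c

instance (commands : List String) (procedures : List (String × List String)) : Decidable (Pre_expand_procedures commands procedures) := by
  unfold Pre_expand_procedures; infer_instance

def pvWitness_expand_procedures : List String × (List (String × List String)) :=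
  (["a", "x"], [("a", ["b", "c"]), ("b", ["hi"])])

def Spec_expand_procedures (commands : List String) (procedures : List (String × List String)) (out : List String) : Prop := out = expand_procedures_alt commands procedures
instance (commands : List String) (procedures : List (String × List String)) (out : List String) : Decidable (Spec_expand_procedures commands procedures out) := by unfold Spec_expand_procedures; infer_instance

-- ===== CLAIM (what is proved, stated in full; the proofs are below) =====
def Claim_equal_expand_procedures : Prop := ∀ (commands : List String) (procedures : List (String × List String)), Dom_expand_procedures commands procedures → Pre_expand_procedures commands procedures → Spec_expand_procedures commands procedures (expand_procedures commands procedures)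

-- ===== LEMMAS AND PROOFS =====

lemma foldl_max_le {l : List Nat} {a m : Nat} (ha : a ≤ m) (h : ∀ x ∈ l, x ≤ m) :
    l.foldl max a ≤ m := by
  induction l generalizing a with
  | nil => exact ha
  | cons x xs ih =>
    exact ih (max_le ha (h x (by simp))) (fun y hy => h y (by simp [hy]))

lemma lvl_le (procedures : List (String × List String)) : ∀ n c, lvl procedures n c ≤ n := by
  intro n
  induction n with
  | zero => intro c; simp [lvl]
  | succ n ih =>
    intro c
    unfold lvl
    cases h : procedures.lookup c with
    | none => simp
    | some body =>
      have hb : (body.map (lvl procedures n)).foldl max 0 ≤ n := by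
        apply foldl_max_le (Nat.zero_le n)
        intro x hx
        rcases List.mem_map.mp hx with ⟨c', _, rfl⟩
        exact ih c'
      simpa using Nat.succ_le_succ hb

-- lvl grows by at most one per round
lemma lvl_lipschitz (procedures : List (String × List String)) :
    ∀ n c, lvl procedures (n + 1) c ≤ lvl procedures n c + 1 := by
  intro n
  induction n with
  | zero => intro c; simpa using lvl_le procedures 1 c
  | succ n ih =>
    intro c
    show lvl procedures (n + 2) c ≤ lvl procedures (n + 1) c + 1
    unfold lvl
    cases h : procedures.lookup c with
    | none => simp
    | some body =>
      have hm : (body.map (lvl procedures (n + 1))).foldl max 0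
          ≤ (body.map (lvl procedures n)).foldl max 0 + 1 := by
        apply foldl_max_le (Nat.zero_le _)
        intro x hx
        rcases List.mem_map.mp hx with ⟨c', hc', rfl⟩
        calc lvl procedures (n + 1) c' ≤ lvl procedures n c' + 1 := ih c'
          _ ≤ (body.map (lvl procedures n)).foldl max 0 + 1 :=
            Nat.add_le_add_right ((PySem.List.le_foldl_max _ 0).2 _
              (List.mem_map.mpr ⟨c', hc', rfl⟩)) 1
      dsimp only
      omega

-- lvl can change between consecutive rounds only while it is at its ceiling
lemma lvl_unstable_ceiling (procedures : List (String × List String)) :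
    ∀ n c, lvl procedures (n + 1) c ≠ lvl procedures n c → lvl procedures (n + 1) c = n + 1 := by
  intro n
  induction n with
  | zero =>
    intro c h
    have h1 := lvl_le procedures (0 + 1) c
    have h0 : lvl procedures 0 c = 0 := by simp [lvl]
    omega
  | succ n ih =>
    intro c h
    show lvl procedures (n + 2) c = n + 2
    rcases hl : procedures.lookup c with _ | body
    · exfalso
      apply h
      show lvl procedures (n + 2) c = lvl procedures (n + 1) c
      unfold lvl
      rw [hl]
    · have hunf2 : lvl procedures (n + 2) c = (body.map (lvl procedures (n + 1))).foldl max 0 + 1 := by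
        unfold lvl; rw [hl]
      have hunf1 : lvl procedures (n + 1) c = (body.map (lvl procedures n)).foldl max 0 + 1 := by
        unfold lvl; rw [hl]
      have hne : (body.map (lvl procedures (n + 1))).foldl max 0
          ≠ (body.map (lvl procedures n)).foldl max 0 := by
        intro he; exact h (by rw [hunf2, hunf1, he])
      -- some body element changed between rounds n and n+1
      have hex : ∃ c' ∈ body, lvl procedures (n + 1) c' ≠ lvl procedures n c' := by
        by_contra hall
        push Not at hall
        exact hne (by
          congr 1
          exact List.map_congr_left (fun c' hc' => hall c' hc'))
      rcases hex with ⟨c', hc', hne'⟩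
      have hceil : lvl procedures (n + 1) c' = n + 1 := ih c' hne'
      have hmax_ge : n + 1 ≤ (body.map (lvl procedures (n + 1))).foldl max 0 := by
        have := (PySem.List.le_foldl_max (body.map (lvl procedures (n + 1))) 0).2
          (lvl procedures (n + 1) c') (List.mem_map.mpr ⟨c', hc', rfl⟩)
        omega
      have hmax_le : (body.map (lvl procedures (n + 1))).foldl max 0 ≤ n + 1 := by
        apply foldl_max_le (Nat.zero_le _)
        intro x hx
        rcases List.mem_map.mp hx with ⟨c'', _, rfl⟩
        exact lvl_le procedures (n + 1) c''
      omega

-- a stable command's body commands are stable too, with strictly smaller lvl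
lemma lvl_body (procedures : List (String × List String))
    {c : String} {body : List String} (hc : procedures.lookup c = some body)
    (hstab : lvl procedures procedures.length c = lvl procedures (procedures.length + 1) c)
    {c' : String} (hc' : c' ∈ body) :
    lvl procedures procedures.length c' = lvl procedures (procedures.length + 1) c' ∧
    lvl procedures (procedures.length + 1) c' < lvl procedures (procedures.length + 1) c := by
  have hunf : lvl procedures (procedures.length + 1) c
      = (body.map (lvl procedures procedures.length)).foldl max 0 + 1 := by
    unfold lvl; rw [hc]
  have hle : lvl procedures procedures.length c'
      ≤ (body.map (lvl procedures procedures.length)).foldl max 0 :=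
    (PySem.List.le_foldl_max _ 0).2 _ (List.mem_map.mpr ⟨c', hc', rfl⟩)
  have hcle := lvl_le procedures procedures.length c
  have hlip := lvl_lipschitz procedures procedures.length c'
  have hstab' : lvl procedures (procedures.length + 1) c' = lvl procedures procedures.length c' := by
    by_contra hne
    have := lvl_unstable_ceiling procedures procedures.length c' hne
    omega
  constructor
  · omega
  · omega

-- with enough depth, expandA succeeds (the depth guard never fires under Pre_)
lemma expandA_isSome (procedures : List (String × List String)) :
    ∀ d cmds, (∀ c ∈ cmds,
        lvl procedures procedures.length c = lvl procedures (procedures.length + 1) c ∧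
        lvl procedures (procedures.length + 1) c < d) →
      (expandA procedures d cmds).isSome := by
  intro d
  induction d using Nat.strong_induction_on with
  | _ d ihd =>
    intro cmds
    induction cmds with
    | nil => intro _; simp [expandA]
    | cons c cs ihc =>
      intro h
      have hcs : (expandA procedures d cs).isSome :=
        ihc (fun c'' hc'' => h c'' (List.mem_cons_of_mem _ hc''))
      rw [expandA]
      cases hl : procedures.lookup c with
      | none => simpa using hcs
      | some body =>
        obtain ⟨hstab, hd⟩ := h c List.mem_cons_self
        cases d with
        | zero => omega
        | succ d' =>
          have hb : (expandA procedures d' body).isSome := by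
            apply ihd d' (Nat.lt_succ_self d') body
            intro c'' hc''
            obtain ⟨hs, hlt⟩ := lvl_body procedures hl hstab hc''
            exact ⟨hs, by omega⟩
          rcases Option.isSome_iff_exists.mp hb with ⟨eb, heb⟩
          rcases Option.isSome_iff_exists.mp hcs with ⟨ec, hec⟩
          simp [heb, hec]

-- the stack loop consumes the top list in exactly `stepsB` iterations, appending its expansion
lemma loopB_spec (procedures : List (String × List String)) :
    ∀ d cmds e, expandA procedures d cmds = some e →
      ∀ rest result fuel,
        loopB procedures (stepsB procedures d cmds + fuel) (cmds :: rest) result =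
        loopB procedures fuel rest (result ++ e) := by
  intro d
  induction d using Nat.strong_induction_on with
  | _ d ihd =>
    intro cmds
    induction cmds with
    | nil =>
      intro e he rest result fuel
      rw [expandA] at he
      injection he with he
      subst he
      rw [stepsB, Nat.add_comm 1 fuel]
      simp [loopB]
    | cons c cs ihc =>
      intro e he rest result fuel
      rw [expandA] at he
      rw [stepsB]
      cases hl : procedures.lookup c with
      | none =>
        rw [hl] at he
        rcases Option.map_eq_some_iff.mp he with ⟨ec, hec, rfl⟩
        have h1 : 1 + stepsB procedures d cs + fuel
            = (stepsB procedures d cs + fuel) + 1 := by omega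
        rw [h1, loopB, hl]; dsimp only; rw [ihc ec hec]
        simp
      | some body =>
        rw [hl] at he
        cases d with
        | zero => simp at he
        | succ d' =>
          dsimp only at he ⊢
          rcases hb : expandA procedures d' body with _ | eb
          · rw [hb] at he; simp at he
          rcases hc : expandA procedures (d' + 1) cs with _ | ec
          · rw [hb, hc] at he; simp at he
          rw [hb, hc] at he
          injection he with he
          subst he
          have h1 : 1 + stepsB procedures d' body + stepsB procedures (d' + 1) cs + fuel
              = (stepsB procedures d' body + (stepsB procedures (d' + 1) cs + fuel)) + 1 := by omega
          rw [h1, loopB, hl]; dsimp only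
          rw [ihd d' (Nat.lt_succ_self d') body eb hb, ihc ec hc]
          simp

-- ===== VERDICT (by name: the statement is the Claim_ definition above) =====
theorem expand_procedures_spec : Claim_equal_expand_procedures := by
  intro commands procedures _ hpre
  unfold Spec_expand_procedures expand_procedures expand_procedures_alt
  have hsome := expandA_isSome procedures (procedures.length + 1) commands
    (fun c hc => ⟨hpre c hc, by
      have := hpre c hc
      have := lvl_le procedures procedures.length c
      omega⟩)
  rcases Option.isSome_iff_exists.mp hsome with ⟨e, he⟩
  have hstep := loopB_spec procedures (procedures.length + 1) commands e he [] [] 0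
  simp only [Nat.add_zero, List.nil_append] at hstep
  rw [he, hstep]
  simp [loopB]
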